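-- pv_equiv track=rewrite | github.com/eejai42/is-everything-really-a-language | execution-substratrates/uml/take-test.py | parse_ocl_file
-- ===== SOURCE A (Python) =====
-- from typing import List, Dict, Any, Optional, Union
--
-- def parse_ocl_file(ocl_text: str) -> Dict[str, Dict[str, str]]:
--     """Parse OCL constraints file into a dictionary of class -> {attr: expr}."""
--     constraints = {}
--     current_class = None
--
--     for line in ocl_text.split('\n'):
--         line = line.strip()
--
--         if not line or line.startswith('--'):
--             continue
--
--         if line.startswith('context '):
--             current_class = line[8:].strip()
--             if current_class not in constraints:
--                 constraints[current_class] = {}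
--             continue
--
--         if line.startswith('derive '):
--             if current_class is None:
--                 continue
--             rest = line[7:].strip()
--             colon_idx = rest.find(':')
--             if colon_idx == -1:
--                 continue
--             attr_name = rest[:colon_idx].strip()
--             ocl_expr = rest[colon_idx + 1:].strip()
--             constraints[current_class][attr_name] = ocl_expr
--
--     return constraints
-- ===== SOURCE B (Python) =====
-- def parse_ocl_file(ocl_text):
--     """Parse OCL constraints file into a dictionary of class -> {attr: expr}.
--
--     Two-pass decomposition: pass 0 cleans the lines, pass 1 groups them into
--     (class, body-lines) sections at each 'context ' header, pass 2 fills the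
--     constraints dict from the sections.
--     """
--     # pass 0: strip and drop blank/comment lines
--     lines = []
--     for raw in ocl_text.split('\n'):
--         line = raw.strip()
--         if line and not line.startswith('--'):
--             lines.append(line)
--     # pass 1: group into sections; lines before the first 'context ' are dropped
--     sections = []
--     i, n = 0, len(lines)
--     while i < n:
--         line = lines[i]
--         i += 1
--         if line.startswith('context '):
--             body = []
--             while i < n and not lines[i].startswith('context '):
--                 body.append(lines[i])
--                 i += 1
--             sections.append((line[8:].strip(), body))
--     # pass 2: fill the dict (repeated context blocks for one class merge)
--     constraints = {}
--     for cls, body in sections: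
--         attrs = constraints.setdefault(cls, {})
--         for line in body:
--             if line.startswith('derive '):
--                 rest = line[7:].strip()
--                 idx = rest.find(':')
--                 if idx != -1:
--                     attrs[rest[:idx].strip()] = rest[idx + 1:].strip()
--     return constraints
-- ===== Notes on version B (the rewrite author's own statement) =====
-- stated objective: alternative
-- what changed: Replaces A's single stateful loop (current_class flag threaded through every line) by a three-pass pipeline: clean the lines, group them into (class, body) sections at each context header, then fold the sections into the dict; same per-line filtering and splitting so outputs match exactly.
import Mathlib
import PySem

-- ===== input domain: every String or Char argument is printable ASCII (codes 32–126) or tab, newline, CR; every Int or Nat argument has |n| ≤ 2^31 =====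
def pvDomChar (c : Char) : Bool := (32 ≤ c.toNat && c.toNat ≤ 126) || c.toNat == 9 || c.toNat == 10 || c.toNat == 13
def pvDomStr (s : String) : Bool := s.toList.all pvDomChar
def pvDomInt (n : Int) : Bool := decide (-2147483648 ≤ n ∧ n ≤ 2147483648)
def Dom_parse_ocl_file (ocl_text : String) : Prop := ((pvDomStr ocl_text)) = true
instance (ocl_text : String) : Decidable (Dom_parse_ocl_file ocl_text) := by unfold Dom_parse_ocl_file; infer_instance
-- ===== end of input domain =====

-- B replaces A's single stateful line loop (current_class threaded through every line) by a
-- three-pass pipeline: clean the lines, group them into (class, body) sections at each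
-- context header, fold the sections into the dict. Alternative decomposition, same cost.


-- ===== PORT A =====
-- the body of A's loop applied to one already-stripped line; the key current_class is
-- always present at the derive assignment (A inserts it when it is set), so Dict.modify
-- is exact for constraints[current_class][attr] = expr
def pvLineA (st : PySem.Dict String (PySem.Dict String String) × Option String) (line : String) :
    PySem.Dict String (PySem.Dict String String) × Option String :=
  if line == "" || PySem.Str.startswith line "--" then st
  else if PySem.Str.startswith line "context " then
    let cc := PySem.Str.strip (PySem.Str.slice line (some 8) none)
    ((if st.1.contains cc then st.1 else st.1.insert cc PySem.Dict.empty), some cc)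
  else if PySem.Str.startswith line "derive " then
    match st.2 with
    | none => st
    | some c =>
      let rest := PySem.Str.strip (PySem.Str.slice line (some 7) none)
      let colon_idx := PySem.Str.find rest ":"
      if colon_idx == -1 then st
      else
        let attr := PySem.Str.strip (PySem.Str.slice rest none (some colon_idx))
        let expr := PySem.Str.strip (PySem.Str.slice rest (some (colon_idx + 1)) none)
        (st.1.modify c PySem.Dict.empty (fun d => d.insert attr expr), st.2)
  else st

def parse_ocl_file (ocl_text : String) : List (String × List (String × String)) :=
  -- "\n" is nonempty so split? is always some; the .getD [] default never fires
  let raws := (PySem.Str.split? ocl_text "\n").getD []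
  ((raws.foldl (fun st raw => pvLineA st (PySem.Str.strip raw)) (PySem.Dict.empty, none)).1).items.map
    (fun p => (p.1, p.2.items))

-- ===== PORT B =====
def pvIsCtx (line : String) : Bool := PySem.Str.startswith line "context "

-- pass 1 of Source B: the outer while loop is the recursion; the inner body-collecting
-- while loop is takeWhile/dropWhile over the remaining lines
def pvSections : List String → List (String × List String)
  | [] => []
  | l :: ls =>
    if pvIsCtx l then
      (PySem.Str.strip (PySem.Str.slice l (some 8) none), ls.takeWhile (fun x => !pvIsCtx x))
        :: pvSections (ls.dropWhile (fun x => !pvIsCtx x))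
    else pvSections ls
  termination_by ls => ls.length
  decreasing_by
    · exact Nat.lt_succ_of_le (List.length_dropWhile_le _ _)
    · exact Nat.lt_succ_self _

-- pass 2 inner loop body: one body line of the section for class c; attrs aliases
-- constraints[c] (setdefault ran first), so attrs[...] = ... is modify on d
def pvDeriveStep (c : String) (d : PySem.Dict String (PySem.Dict String String)) (line : String) :
    PySem.Dict String (PySem.Dict String String) :=
  if PySem.Str.startswith line "derive " then
    let rest := PySem.Str.strip (PySem.Str.slice line (some 7) none)
    let idx := PySem.Str.find rest ":"
    if idx == -1 then d
    else
      d.modify c PySem.Dict.empty (fun a =>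
        a.insert (PySem.Str.strip (PySem.Str.slice rest none (some idx)))
                 (PySem.Str.strip (PySem.Str.slice rest (some (idx + 1)) none)))
  else d

-- pass 2 outer loop body: one (class, body) section
def pvFillSection (d : PySem.Dict String (PySem.Dict String String))
    (sec : String × List String) : PySem.Dict String (PySem.Dict String String) :=
  sec.2.foldl (pvDeriveStep sec.1) (d.setdefault sec.1 PySem.Dict.empty)

def parse_ocl_file_alt (ocl_text : String) : List (String × List (String × String)) :=
  -- "\n" is nonempty so split? is always some; the .getD [] default never fires
  let raws := (PySem.Str.split? ocl_text "\n").getD []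
  -- pass 0: strip, keep non-blank non-comment lines
  let lines := raws.foldl
    (fun acc raw =>
      let line := PySem.Str.strip raw
      if line == "" || PySem.Str.startswith line "--" then acc else acc ++ [line]) []
  (((pvSections lines).foldl pvFillSection PySem.Dict.empty)).items.map
    (fun p => (p.1, p.2.items))

-- ===== PRECONDITION & SPEC =====
def Spec_parse_ocl_file (ocl_text : String) (out : List (String × List (String × String))) : Prop := out = parse_ocl_file_alt ocl_text
instance (ocl_text : String) (out : List (String × List (String × String))) : Decidable (Spec_parse_ocl_file ocl_text out) := by unfold Spec_parse_ocl_file; infer_instance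

-- ===== CLAIM (what is proved, stated in full; the proofs are below) =====
def Claim_equal_parse_ocl_file : Prop := ∀ (ocl_text : String), Dom_parse_ocl_file ocl_text → Spec_parse_ocl_file ocl_text (parse_ocl_file ocl_text)

-- ===== LEMMAS AND PROOFS =====

-- A's result from state (d, cur): the pending section for cur (its body = the lines up
-- to the next header) filled first, then the sections of the rest
def pvRest (lines : List String) (d : PySem.Dict String (PySem.Dict String String)) :
    Option String → PySem.Dict String (PySem.Dict String String)
  | none => (pvSections lines).foldl pvFillSection d
  | some c =>
      (pvSections (lines.dropWhile (fun x => !pvIsCtx x))).foldl pvFillSection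
        ((lines.takeWhile (fun x => !pvIsCtx x)).foldl (pvDeriveStep c) d)

theorem pvIf_eq_setdefault (d : PySem.Dict String (PySem.Dict String String)) (k : String) :
    (if d.contains k then d else d.insert k PySem.Dict.empty) = d.setdefault k PySem.Dict.empty := by
  by_cases hx : d.contains k = true
  · rw [if_pos hx, PySem.Dict.setdefault_of_contains d _ hx]
  · rw [if_neg hx, PySem.Dict.setdefault_of_not_contains d _ (by simpa using hx)]

-- keys survive a pvDeriveStep
theorem pvContains_deriveStep (c k : String) (d : PySem.Dict String (PySem.Dict String String))
    (line : String) (h : d.contains k = true) : (pvDeriveStep c d line).contains k = true := by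
  unfold pvDeriveStep
  dsimp only
  split
  · split
    · exact h
    · simp [PySem.Dict.contains_modify, h]
  · exact h

theorem pvSections_cons_ctx (l : String) (ls : List String) (hc : pvIsCtx l = true) :
    pvSections (l :: ls)
      = (PySem.Str.strip (PySem.Str.slice l (some 8) none), ls.takeWhile (fun x => !pvIsCtx x))
        :: pvSections (ls.dropWhile (fun x => !pvIsCtx x)) := by
  simp only [pvSections]
  rw [if_pos hc]

theorem pvSections_cons_not_ctx (l : String) (ls : List String) (hc : ¬ pvIsCtx l = true) :
    pvSections (l :: ls) = pvSections ls := by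
  simp only [pvSections]
  rw [if_neg hc]

-- MAIN INVARIANT: A's fold over the clean lines, from state (d, cur), equals B's
-- pass 2 on the pending section followed by the sections of the rest
theorem pvMain (lines : List String) (d : PySem.Dict String (PySem.Dict String String))
    (cur : Option String)
    (hcl : ∀ l ∈ lines, (l == "" || PySem.Str.startswith l "--") = false)
    (h : ∀ c, cur = some c → d.contains c = true) :
    (lines.foldl pvLineA (d, cur)).1 = pvRest lines d cur := by
  induction lines generalizing d cur with
  | nil => cases cur <;> simp [pvRest, pvSections]
  | cons l ls ih =>
    have hb : ¬((l == "" || PySem.Str.startswith l "--") = true) := by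
      rw [hcl l List.mem_cons_self]; exact Bool.false_ne_true
    have hcl' : ∀ x ∈ ls, (x == "" || PySem.Str.startswith x "--") = false :=
      fun x hx => hcl x (List.mem_cons_of_mem l hx)
    by_cases hc : pvIsCtx l = true
    · have hcs : PySem.Str.startswith l "context " = true := hc
      have hstep : pvLineA (d, cur) l
          = (d.setdefault (PySem.Str.strip (PySem.Str.slice l (some 8) none)) PySem.Dict.empty,
             some (PySem.Str.strip (PySem.Str.slice l (some 8) none))) := by
        unfold pvLineA
        rw [if_neg hb, if_pos hcs]
        dsimp only
        rw [pvIf_eq_setdefault]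
      have hcont : (d.setdefault (PySem.Str.strip (PySem.Str.slice l (some 8) none))
          PySem.Dict.empty).contains (PySem.Str.strip (PySem.Str.slice l (some 8) none)) = true := by
        simp [PySem.Dict.contains_setdefault]
      have hrec := ih (d.setdefault (PySem.Str.strip (PySem.Str.slice l (some 8) none))
          PySem.Dict.empty) (some (PySem.Str.strip (PySem.Str.slice l (some 8) none))) hcl'
          (fun c hcx => by rw [← Option.some.inj hcx]; exact hcont)
      simp only [List.foldl_cons, hstep, hrec]
      cases cur with
      | none =>
        simp only [pvRest]
        rw [pvSections_cons_ctx l ls hc, List.foldl_cons]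
        simp only [pvFillSection]
      | some c =>
        simp only [pvRest]
        rw [List.takeWhile_cons, List.dropWhile_cons, if_neg (by simp [hc]), if_neg (by simp [hc]),
            List.foldl_nil, pvSections_cons_ctx l ls hc, List.foldl_cons]
        simp only [pvFillSection]
    · have hcf : ¬(PySem.Str.startswith l "context " = true) := hc
      have hnc : (!pvIsCtx l) = true := by simp [pvIsCtx] at hc ⊢; simpa using hc
      cases cur with
      | none =>
        have hstep : pvLineA (d, none) l = (d, none) := by
          unfold pvLineA
          rw [if_neg hb, if_neg hcf]
          dsimp only
          split <;> rfl
        simp only [List.foldl_cons, hstep]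
        rw [ih d none hcl' h]
        simp only [pvRest]
        rw [pvSections_cons_not_ctx l ls hc]
      | some c =>
        have hstep : pvLineA (d, some c) l = (pvDeriveStep c d l, some c) := by
          unfold pvLineA pvDeriveStep
          rw [if_neg hb, if_neg hcf]
          dsimp only
          split
          · split <;> rfl
          · rfl
        have hcont : (pvDeriveStep c d l).contains c = true :=
          pvContains_deriveStep c c d l (h c rfl)
        simp only [List.foldl_cons, hstep]
        rw [ih (pvDeriveStep c d l) (some c) hcl' (fun c' hcx => by rw [← Option.some.inj hcx]; exact hcont)]
        simp only [pvRest]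
        rw [List.takeWhile_cons, List.dropWhile_cons, if_pos hnc, if_pos hnc, List.foldl_cons]

-- a "continue"-style loop is a fold over the kept elements
theorem pvFoldl_skip {α δ : Type} (p : α → Bool) (f : δ → α → δ) (l : List α) (init : δ) :
    l.foldl (fun st x => if p x then st else f st x) init
      = (l.filter (fun x => !p x)).foldl f init := by
  rw [← PySem.List.foldl_if_eq_foldl_filter (fun x => !p x) f l init]
  refine PySem.List.foldl_congr_mem l _ _ init ?_
  intro acc x _
  cases h : p x <;> simp

-- a filtering append loop builds the filter
theorem pvFoldl_skip_append {α : Type} (p : α → Bool) (l acc : List α) :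
    l.foldl (fun acc x => if p x then acc else acc ++ [x]) acc
      = acc ++ l.filter (fun x => !p x) := by
  rw [← PySem.List.foldl_append_if_eq_filter (fun x => !p x) l acc]
  refine PySem.List.foldl_congr_mem l _ _ acc ?_
  intro a x _
  cases h : p x <;> simp

-- the cleaned line list both versions effectively traverse
def pvClean (raws : List String) : List String :=
  (raws.map PySem.Str.strip).filter
    (fun l => !(l == "" || PySem.Str.startswith l "--"))

theorem pvA_fold_clean (raws : List String)
    (st : PySem.Dict String (PySem.Dict String String) × Option String) :
    raws.foldl (fun st raw => pvLineA st (PySem.Str.strip raw)) st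
      = (pvClean raws).foldl pvLineA st := by
  rw [pvClean, ← List.foldl_map,
      ← pvFoldl_skip (fun l => (l == "" || PySem.Str.startswith l "--")) pvLineA]
  refine PySem.List.foldl_congr_mem _ _ _ st ?_
  intro acc x _
  by_cases hx : (x == "" || PySem.Str.startswith x "--") = true
  · rw [if_pos hx]
    unfold pvLineA
    rw [if_pos hx]
  · rw [if_neg hx]

theorem pvB_clean (raws : List String) :
    raws.foldl
      (fun acc raw =>
        if PySem.Str.strip raw == "" || PySem.Str.startswith (PySem.Str.strip raw) "--" then acc
        else acc ++ [PySem.Str.strip raw]) []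
      = pvClean raws := by
  have h := pvFoldl_skip_append (fun l => (l == "" || PySem.Str.startswith l "--"))
      (raws.map PySem.Str.strip) []
  rw [List.foldl_map] at h
  simpa [pvClean] using h

theorem pvClean_ok (raws : List String) :
    ∀ l ∈ pvClean raws, (l == "" || PySem.Str.startswith l "--") = false := by
  intro l hl
  have := List.of_mem_filter hl
  simpa using this

-- ===== VERDICT (by name: the statement is the Claim_ definition above) =====
theorem parse_ocl_file_spec : Claim_equal_parse_ocl_file := by
  intro ocl_text _
  unfold Spec_parse_ocl_file parse_ocl_file parse_ocl_file_alt
  dsimp only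
  rw [pvB_clean, pvA_fold_clean]
  rw [pvMain (pvClean ((PySem.Str.split? ocl_text "\n").getD [])) PySem.Dict.empty none
      (pvClean_ok _) (fun c hc => by cases hc)]
  rfl
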